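-- pv_equiv track=rewrite | github.com/vigneshsabapathi/python-algorithms | sorts/cycle_sort_optimized.py | cycle_sort_count_writes
-- ===== SOURCE A (Python) =====
-- def cycle_sort_count_writes(array: list) -> tuple[list, int]:
--     """
--     Cycle sort that also returns the number of array writes performed.
--     Demonstrates the O(n) theoretical minimum for in-place sorting.
--
--     Returns (sorted_array, write_count).
--
--     >>> cycle_sort_count_writes([4, 3, 2, 1])[0]
--     [1, 2, 3, 4]
--     >>> cycle_sort_count_writes([])[0]
--     []
--     >>> cycle_sort_count_writes([1, 2, 3, 4])[1]  # already sorted -> 0 writes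
--     0
--     >>> cycle_sort_count_writes([4, 3, 2, 1])[1] <= 4  # at most n writes
--     True
--     >>> cycle_sort_count_writes([3, 3, 3])[0]
--     [3, 3, 3]
--     >>> cycle_sort_count_writes([-2, 5, 0, -45])[0]
--     [-45, -2, 0, 5]
--     """
--     arr = list(array)
--     n = len(arr)
--     writes = 0
--
--     for cycle_start in range(n - 1):
--         item = arr[cycle_start]
--
--         pos = cycle_start
--         for i in range(cycle_start + 1, n):
--             if arr[i] < item:
--                 pos += 1
--
--         if pos == cycle_start:
--             continue
--
--         while item == arr[pos]:
--             pos += 1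
--
--         arr[pos], item = item, arr[pos]
--         writes += 1
--
--         while pos != cycle_start:
--             pos = cycle_start
--             for i in range(cycle_start + 1, n):
--                 if arr[i] < item:
--                     pos += 1
--
--             while item == arr[pos]:
--                 pos += 1
--
--             arr[pos], item = item, arr[pos]
--             writes += 1
--
--     return arr, writes
-- ===== SOURCE B (Python) =====
-- def cycle_sort_count_writes(array: list) -> tuple[list, int]:
--     """Sort via sorted(); writes = positions whose value differs from its sorted value."""
--     arr = sorted(array)
--     writes = sum(a != b for a, b in zip(array, arr))
--     return arr, writes
-- ===== Notes on version B (the rewrite author's own statement) =====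
-- stated objective: faster
-- what changed: B replaces the quadratic cycle-placement simulation by sorting the input once and counting writes as the number of positions whose value differs between the input and its sorted rearrangement.
import Mathlib
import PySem

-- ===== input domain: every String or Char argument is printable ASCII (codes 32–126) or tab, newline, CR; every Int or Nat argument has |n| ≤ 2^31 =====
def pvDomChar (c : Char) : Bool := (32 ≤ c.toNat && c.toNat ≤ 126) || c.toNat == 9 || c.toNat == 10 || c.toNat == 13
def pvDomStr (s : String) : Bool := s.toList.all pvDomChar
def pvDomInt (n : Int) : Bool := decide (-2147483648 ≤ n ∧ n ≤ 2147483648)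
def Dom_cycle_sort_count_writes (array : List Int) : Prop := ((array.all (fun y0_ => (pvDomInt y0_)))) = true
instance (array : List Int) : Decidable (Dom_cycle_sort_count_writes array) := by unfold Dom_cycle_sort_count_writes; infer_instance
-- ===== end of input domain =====

-- B sorts once and counts mismatched positions instead of simulating cycle sort (objective: faster).


-- ===== PORT A =====
-- All Python index reads/writes below happen at provably nonnegative in-range positions,
-- so the loop counters are carried as Nat and reads use the total getD form.

-- 'pos = cycle_start; for i in range(cycle_start + 1, n): if arr[i] < item: pos += 1'
def pvCsPos (arr : List Int) (cs : Nat) (item : Int) : Nat :=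
  (PySem.List.pyRange ((cs : Int) + 1) (arr.length : Int) 1).foldl
    (fun pos i => if PySem.List.pyGetD arr i 0 < item then pos + 1 else pos) cs

-- 'while item == arr[pos]: pos += 1'
def pvSkipEq (arr : List Int) (item : Int) (pos : Nat) : Nat :=
  if _h : pos < arr.length then
    if arr.getD pos 0 = item then pvSkipEq arr item (pos + 1) else pos
  else pos  -- totality guard; Python's read arr[pos] is in range whenever this loop runs
termination_by arr.length - pos

-- 'while pos != cycle_start: …'  (fuel guard only: each pass performs one write that fixes a
-- misplaced slot, so fuel = n always suffices; the guard is never reached)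
def pvCycle (fuel : Nat) (arr : List Int) (cs : Nat) (item : Int) (pos : Nat) (writes : Int) :
    List Int × Int :=
  if pos = cs then (arr, writes)
  else
    match fuel with
    | 0 => (arr, writes)
    | fuel + 1 =>
      let pos1 := pvCsPos arr cs item
      let pos2 := pvSkipEq arr item pos1
      let item' := arr.getD pos2 0
      pvCycle fuel (arr.set pos2 item) cs item' pos2 (writes + 1)

def cycle_sort_count_writes (array : List Int) : List Int × Int :=
  let arr := array
  let n := arr.length
  (PySem.List.pyRange 0 ((n : Int) - 1) 1).foldl
    (fun st csI =>
      let arr := st.1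
      let writes := st.2
      let cs := csI.toNat
      let item := arr.getD cs 0
      let pos := pvCsPos arr cs item
      if pos = cs then (arr, writes)
      else
        let pos2 := pvSkipEq arr item pos
        let item' := arr.getD pos2 0
        pvCycle n (arr.set pos2 item) cs item' pos2 (writes + 1))
    (arr, 0)

-- ===== PORT B =====
def cycle_sort_count_writes_alt (array : List Int) : List Int × Int :=
  let arr := PySem.List.sorted array (fun x => x) false
  let writes := (array.zip arr).foldl (fun w p => w + (if p.1 ≠ p.2 then (1 : Int) else 0)) 0
  (arr, writes)

-- ===== PRECONDITION & SPEC =====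
def Spec_cycle_sort_count_writes (array : List Int) (out : List Int × Int) : Prop := out = cycle_sort_count_writes_alt array
instance (array : List Int) (out : List Int × Int) : Decidable (Spec_cycle_sort_count_writes array out) := by unfold Spec_cycle_sort_count_writes; infer_instance

-- ===== CLAIM (what is proved, stated in full; the proofs are below) =====
def Claim_equal_cycle_sort_count_writes : Prop := ∀ (array : List Int), Dom_cycle_sort_count_writes array → Spec_cycle_sort_count_writes array (cycle_sort_count_writes array)

-- ===== LEMMAS AND PROOFS =====

-- S: the sorted rearrangement both programs produce
def pvS (array : List Int) : List Int := PySem.List.sorted array (fun x => x) false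

-- number of positions of arr that do not yet hold their sorted value
def pvWr (S arr : List Int) : Nat :=
  (List.range S.length).countP (fun j => decide (arr.getD j 0 ≠ S.getD j 0))

lemma pvFoldlCountNat (v : Int) (l : List Int) (a : Nat) :
    l.foldl (fun pos x => if x < v then pos + 1 else pos) a =
      a + l.countP (fun x => decide (x < v)) := by
  induction l generalizing a with
  | nil => simp
  | cons x t ih =>
    by_cases h : x < v <;> simp [ih, h] <;> omega


lemma pvCsPos_eq (arr : List Int) (cs : Nat) (v : Int) :
    pvCsPos arr cs v = cs + (arr.drop (cs + 1)).countP (fun x => decide (x < v)) := by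
  unfold pvCsPos
  have h0 : (0 : Int) ≤ (cs : Int) + 1 := by omega
  have := PySem.List.foldl_pyRange_pyGetD' arr 0
      (fun (pos : Nat) (x : Int) => if x < v then pos + 1 else pos) cs h0
  rw [this]
  have : ((cs : Int) + 1).toNat = cs + 1 := by omega
  rw [this, pvFoldlCountNat v]


lemma pvSkipEq_ge (arr : List Int) (v : Int) (pos : Nat) : pos ≤ pvSkipEq arr v pos := by
  induction pos using pvSkipEq.induct (arr := arr) (item := v) with
  | case1 pos h1 h2 ih => rw [pvSkipEq, dif_pos h1, if_pos h2]; omega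
  | case2 pos h1 h2 => rw [pvSkipEq, dif_pos h1, if_neg h2]
  | case3 pos h1 => rw [pvSkipEq, dif_neg h1]


lemma pvSkipEq_mid (arr : List Int) (v : Int) (pos : Nat) : ∀ q, pos ≤ q →
    q < pvSkipEq arr v pos → q < arr.length ∧ arr.getD q 0 = v := by
  induction pos using pvSkipEq.induct (arr := arr) (item := v) with
  | case1 pos h1 h2 ih =>
    intro q hq1 hq2
    rw [pvSkipEq, dif_pos h1, if_pos h2] at hq2
    rcases Nat.eq_or_lt_of_le hq1 with h | h
    · exact ⟨h ▸ h1, h ▸ h2⟩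
    · exact ih q h hq2
  | case2 pos h1 h2 => intro q hq1 hq2; rw [pvSkipEq, dif_pos h1, if_neg h2] at hq2; omega
  | case3 pos h1 => intro q hq1 hq2; rw [pvSkipEq, dif_neg h1] at hq2; omega


lemma pvSkipEq_stop (arr : List Int) (v : Int) (pos : Nat)
    (h : pvSkipEq arr v pos < arr.length) : arr.getD (pvSkipEq arr v pos) 0 ≠ v := by
  induction pos using pvSkipEq.induct (arr := arr) (item := v) with
  | case1 pos h1 h2 ih =>
    rw [pvSkipEq, dif_pos h1, if_pos h2] at h ⊢; exact ih h
  | case2 pos h1 h2 => rw [pvSkipEq, dif_pos h1, if_neg h2]; exact h2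
  | case3 pos h1 => rw [pvSkipEq, dif_neg h1] at h; omega


lemma pvIntervalCount (arr : List Int) (v : Int) :
    ∀ (L a : Nat), (∀ q, a ≤ q → q < a + L → q < arr.length ∧ arr.getD q 0 = v) →
    L ≤ (arr.drop a).count v := by
  intro L
  induction L with
  | zero => intro a _; omega
  | succ L ih =>
    intro a hq
    have ha : a < arr.length := (hq a (le_refl a) (by omega)).1
    have hv : arr.getD a 0 = v := (hq a (le_refl a) (by omega)).2
    have hdrop : arr.drop a = arr[a] :: arr.drop (a + 1) := List.drop_eq_getElem_cons ha
    have hav : arr[a] = v := by rwa [List.getD_eq_getElem _ _ ha] at hv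
    rw [hdrop, List.count_cons]
    have := ih (a + 1) (fun q h1 h2 => hq q (by omega) (by omega))
    simp [hav]
    omega


lemma pvCntLtAddCountLe (S : List Int) (v : Int) :
    S.countP (fun x => decide (x < v)) + S.count v ≤ S.length := by
  induction S with
  | nil => simp
  | cons x t ih =>
    rw [List.countP_cons, List.count_cons]
    by_cases h : x < v <;> by_cases h2 : x = v <;> simp [h, h2] <;> omega


lemma pvTakeCounts (v : Int) :
    ∀ (S : List Int), S.Pairwise (· ≤ ·) → ∀ cs : Nat,
      (S.take cs).countP (fun x => decide (x < v)) = min cs (S.countP (fun x => decide (x < v))) ∧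
      (S.take cs).count v + min cs (S.countP (fun x => decide (x < v))) =
        min cs (S.countP (fun x => decide (x < v)) + S.count v) := by
  intro S
  induction S with
  | nil => intro _ cs; simp
  | cons a T ih =>
    intro hp cs
    have hT := ih (List.Pairwise.of_cons hp)
    have hge : ∀ x ∈ T, a ≤ x := fun x hx => List.rel_of_pairwise_cons hp hx
    cases cs with
    | zero => simp
    | succ cs =>
      have hTc := hT cs
      rw [List.take_succ_cons, List.countP_cons, List.countP_cons, List.count_cons,
        List.count_cons]
      rcases lt_trichotomy a v with h1 | h1 | h1
      · have h2 : ¬ a = v := by omega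
        simp only [h1, decide_true, if_true, beq_iff_eq, h2, if_false]
        omega
      · -- a = v : nothing in T is < v
        have hT0 : T.countP (fun x => decide (x < v)) = 0 := by
          rw [List.countP_eq_zero]; intro x hx; have := hge x hx; simp; omega
        have htake0 : (T.take cs).countP (fun x => decide (x < v)) = 0 := by
          rw [List.countP_eq_zero]; intro x hx
          have := hge x (List.mem_of_mem_take hx); simp; omega
        have h2 : ¬ a < v := by omega
        simp only [decide_false, beq_iff_eq, h1, if_true, lt_self_iff_false]
        rw [hT0, htake0]
        rw [hT0] at hTc
        norm_num
        omega
      · -- v < a : everything is > v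
        have h2 : ¬ a < v := by omega
        have h3 : ¬ a = v := by omega
        have hT0 : T.countP (fun x => decide (x < v)) = 0 := by
          rw [List.countP_eq_zero]; intro x hx; have := hge x hx; simp; omega
        have htake0 : (T.take cs).countP (fun x => decide (x < v)) = 0 := by
          rw [List.countP_eq_zero]; intro x hx
          have := hge x (List.mem_of_mem_take hx); simp; omega
        have hc0 : T.count v = 0 := by
          rw [List.count_eq_zero]; intro hx; have := hge v hx; omega
        have htc0 : (T.take cs).count v = 0 := by
          rw [List.count_eq_zero]; intro hx
          have := hge v (List.mem_of_mem_take hx); omega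
        simp only [h2, h3, decide_false, if_false, beq_iff_eq]
        rw [hT0, htake0, hc0, htc0]
        simp


lemma pvBlock (S : List Int) (hS : S.Pairwise (· ≤ ·)) (v : Int) (j : Nat) (hj : j < S.length) :
    S.getD j 0 = v ↔
      S.countP (fun x => decide (x < v)) ≤ j ∧
      j < S.countP (fun x => decide (x < v)) + S.count v := by
  have t1 := pvTakeCounts v S hS j
  have t2 := pvTakeCounts v S hS (j + 1)
  have hsucc : S.take (j + 1) = S.take j ++ [S[j]] := by
    rw [List.take_add_one]
    simp [List.getElem?_eq_getElem hj]
  have hcnt : (S.take (j+1)).count v = (S.take j).count v + (if S[j] = v then 1 else 0) := by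
    rw [hsucc, List.count_append]
    by_cases h : S[j] = v
    · simp [h]
    · simp [h]
  have hgd : S.getD j 0 = S[j] := List.getD_eq_getElem S 0 hj
  rw [hgd]
  by_cases h : S[j] = v
  · simp only [h, if_true] at hcnt
    constructor
    · intro _
      omega
    · intro _; exact h
  · simp only [h, if_false] at hcnt
    constructor
    · intro hc; exact absurd hc h
    · intro hc
      exfalso
      omega


lemma pvGetD_set_ne (l : List Int) (n : Nat) (a : Int) (j : Nat) (hj : j ≠ n) :
    (l.set n a).getD j 0 = l.getD j 0 := by
  simp [List.getD_eq_getElem?_getD, List.getElem?_set_ne (by omega : n ≠ j)]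


lemma pvGetD_set_self (l : List Int) (n : Nat) (a : Int) (h : n < l.length) :
    (l.set n a).getD n 0 = a := by
  simp [List.getD_eq_getElem?_getD, h]


lemma pvSet_getD_self (l : List Int) (n : Nat) (h : n < l.length) :
    l.set n (l.getD n 0) = l := by
  rw [List.getD_eq_getElem _ _ h]
  exact List.set_getElem_self h


lemma pvCountSet (l : List Int) (p : Nat) (a : Int) (h : p < l.length) (x : Int) :
    (l.set p a).count x + (if l.getD p 0 = x then 1 else 0) =
      l.count x + (if a = x then 1 else 0) := by
  have hdec : l = l.take p ++ l[p] :: l.drop (p + 1) := by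
    conv_lhs => rw [← List.set_getElem_self h]
    exact List.set_eq_take_cons_drop _ h
  rw [List.set_eq_take_cons_drop a h]
  conv_rhs => rw [hdec]
  rw [List.count_append, List.count_append, List.count_cons, List.count_cons,
    List.getD_eq_getElem _ _ h]
  by_cases h1 : l[p] = x <;> by_cases h2 : a = x <;> simp [h1, h2] <;> omega


-- the two counting identities the position computation rests on
lemma pvCountsCore (S arr : List Int) (cs : Nat) (v : Int)
    (hlen : arr.length = S.length) (hcs : cs < S.length)
    (hpre : arr.take cs = S.take cs) (hperm : (arr.set cs v).Perm S) :
    pvCsPos arr cs v + (S.take cs).countP (fun x => decide (x < v)) =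
        cs + S.countP (fun x => decide (x < v)) ∧
      (S.take cs).count v + 1 + (arr.drop (cs + 1)).count v = S.count v := by
  have hcs' : cs < arr.length := by omega
  have hset : arr.set cs v = arr.take cs ++ v :: arr.drop (cs + 1) :=
    List.set_eq_take_cons_drop v hcs'
  have hcp := hperm.countP_eq (fun x => decide (x < v))
  have hcc := hperm.count_eq v
  rw [hset, List.countP_append, List.countP_cons, hpre] at hcp
  rw [hset, List.count_append, List.count_cons, hpre] at hcc
  simp only [lt_self_iff_false, decide_false, beq_self_eq_true, if_true] at hcp hcc
  norm_num at hcp hcc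
  constructor
  · rw [pvCsPos_eq]
    omega
  · omega


lemma pvPos_iff (S arr : List Int) (cs : Nat) (v : Int) (hS : S.Pairwise (· ≤ ·))
    (hlen : arr.length = S.length) (hcs : cs < S.length)
    (hpre : arr.take cs = S.take cs) (hperm : (arr.set cs v).Perm S) :
    pvCsPos arr cs v = cs ↔ S.getD cs 0 = v := by
  rcases pvCountsCore S arr cs v hlen hcs hpre hperm with ⟨e1, e2⟩
  rcases pvTakeCounts v S hS cs with ⟨t1, t2⟩
  have hb := pvBlock S hS v cs hcs
  constructor
  · intro h
    exact hb.mpr (by omega)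
  · intro h
    have := hb.mp h
    omega


-- where one write of the cycle lands: a position that currently holds a wrong value
-- and whose sorted value is the item in hand
lemma pvStep (S arr : List Int) (cs : Nat) (v : Int) (hS : S.Pairwise (· ≤ ·))
    (hlen : arr.length = S.length) (hcs : cs < S.length)
    (hpre : arr.take cs = S.take cs) (hperm : (arr.set cs v).Perm S)
    (hwr : arr.getD cs 0 ≠ S.getD cs 0) :
    cs ≤ pvSkipEq arr v (pvCsPos arr cs v) ∧
      pvSkipEq arr v (pvCsPos arr cs v) < S.length ∧
      S.getD (pvSkipEq arr v (pvCsPos arr cs v)) 0 = v ∧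
      arr.getD (pvSkipEq arr v (pvCsPos arr cs v)) 0 ≠ v ∧
      (pvCsPos arr cs v ≠ cs → cs < pvSkipEq arr v (pvCsPos arr cs v)) := by
  rcases pvCountsCore S arr cs v hlen hcs hpre hperm with ⟨e1, e2⟩
  rcases pvTakeCounts v S hS cs with ⟨t1, t2⟩
  have hsum := pvCntLtAddCountLe S v
  have hp1 := pvCsPos_eq arr cs v
  have hp1cs : cs ≤ pvCsPos arr cs v := by omega
  by_cases hA : pvCsPos arr cs v = cs
  · have hScs : S.getD cs 0 = v := (pvPos_iff S arr cs v hS hlen hcs hpre hperm).mp hA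
    have harr : arr.getD cs 0 ≠ v := fun h => hwr (h.trans hScs.symm)
    have hstop : pvSkipEq arr v (pvCsPos arr cs v) = pvCsPos arr cs v := by
      by_contra hne
      have hlt : pvCsPos arr cs v < pvSkipEq arr v (pvCsPos arr cs v) :=
        lt_of_le_of_ne (pvSkipEq_ge arr v _) (fun h => hne h.symm)
      have := (pvSkipEq_mid arr v _ _ (le_refl _) hlt).2
      rw [hA] at this
      exact harr this
    rw [hstop, hA]
    exact ⟨le_refl _, hcs, hScs, harr, fun h => absurd rfl h⟩
  · have hgt : cs < pvCsPos arr cs v := lt_of_le_of_ne hp1cs (Ne.symm hA)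
    have hge : pvCsPos arr cs v ≤ pvSkipEq arr v (pvCsPos arr cs v) := pvSkipEq_ge arr v _
    have hcount : pvSkipEq arr v (pvCsPos arr cs v) - pvCsPos arr cs v ≤
        (arr.drop (pvCsPos arr cs v)).count v :=
      pvIntervalCount arr v _ _ (fun q h1 h2 => pvSkipEq_mid arr v _ q h1 (by omega))
    have hmono : (arr.drop (pvCsPos arr cs v)).count v ≤ (arr.drop (cs + 1)).count v := by
      have hd : arr.drop (pvCsPos arr cs v) = (arr.drop (cs + 1)).drop (pvCsPos arr cs v - (cs + 1)) := by
        rw [List.drop_drop]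
        congr 1
        omega
      rw [hd]
      exact List.Sublist.count_le v (List.drop_sublist _ _)
    have hr_lt : pvSkipEq arr v (pvCsPos arr cs v) < S.length := by omega
    have hstop' : arr.getD (pvSkipEq arr v (pvCsPos arr cs v)) 0 ≠ v :=
      pvSkipEq_stop arr v _ (by omega)
    have hSr : S.getD (pvSkipEq arr v (pvCsPos arr cs v)) 0 = v :=
      (pvBlock S hS v _ hr_lt).mpr (by omega)
    exact ⟨by omega, hr_lt, hSr, hstop', fun _ => by omega⟩


lemma pvWr_le (S arr : List Int) : pvWr S arr ≤ S.length := by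
  unfold pvWr
  have := List.countP_le_length
    (p := fun j => decide (arr.getD j 0 ≠ S.getD j 0)) (l := List.range S.length)
  simpa only [List.length_range] using this


lemma pvWr_pos (S arr : List Int) (cs : Nat) (hcs : cs < S.length)
    (h : arr.getD cs 0 ≠ S.getD cs 0) : 1 ≤ pvWr S arr := by
  have : 0 < (List.range S.length).countP (fun j => decide (arr.getD j 0 ≠ S.getD j 0)) := by
    rw [List.countP_pos_iff]
    exact ⟨cs, List.mem_range.mpr hcs, by simpa using h⟩
  unfold pvWr
  omega


lemma pvCountPRangeCongrExcept (f g : Nat → Bool) :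
    ∀ (n p : Nat), p < n → (∀ j, j ≠ p → f j = g j) → f p = true → g p = false →
    (List.range n).countP f = (List.range n).countP g + 1 := by
  intro n
  induction n with
  | zero => intro p hp; omega
  | succ n ih =>
    intro p hp hfg hf hg
    rw [List.range_succ, List.countP_append, List.countP_append]
    rcases Nat.lt_or_ge p n with h | h
    · have hn : f n = g n := hfg n (by omega)
      rw [ih p h hfg hf hg]
      simp only [List.countP_cons, List.countP_nil, hn]
      omega
    · have hpn : p = n := by omega
      subst hpn
      have heq : (List.range p).countP f = (List.range p).countP g :=
        List.countP_congr (fun j hj => by rw [hfg j (by simp at hj; omega)])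
      rw [heq]
      simp only [List.countP_cons, List.countP_nil, hf, hg]
      norm_num


lemma pvWr_set (S arr : List Int) (p : Nat) (v : Int) (hp : p < S.length)
    (hlen : arr.length = S.length) (hSv : S.getD p 0 = v) (hav : arr.getD p 0 ≠ v) :
    pvWr S (arr.set p v) + 1 = pvWr S arr := by
  unfold pvWr
  have h := pvCountPRangeCongrExcept
    (fun j => decide (arr.getD j 0 ≠ S.getD j 0))
    (fun j => decide ((arr.set p v).getD j 0 ≠ S.getD j 0))
    S.length p hp
    (fun j hj => by simp only [pvGetD_set_ne arr p v j hj])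
    (by simp only [decide_eq_true_eq]; rw [hSv]; exact hav)
    (by simp only []; rw [pvGetD_set_self arr p v (by omega), hSv]; simp)
  omega

lemma pvWr_self (S : List Int) : pvWr S S = 0 := by
  unfold pvWr
  rw [List.countP_eq_zero]
  intro j _
  simp


lemma pvZipCount (xs ys : List Int) (h : xs.length = ys.length) :
    ((xs.zip ys).countP (fun p => decide (p.1 ≠ p.2)) : Nat) = pvWr ys xs := by
  unfold pvWr
  induction xs generalizing ys with
  | nil =>
    have : ys = [] := by
      cases ys
      · rfl
      · simp at h
    subst this
    simp
  | cons x t ih =>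
    cases ys with
    | nil => simp at h
    | cons y u =>
      have hl : t.length = u.length := by simpa using h
      have hzip : (x :: t).zip (y :: u) = (x, y) :: t.zip u := rfl
      have hrange : List.range (y :: u).length = 0 :: (List.range u.length).map Nat.succ := by
        simp [List.range_succ_eq_map]
      rw [hzip, List.countP_cons, hrange, List.countP_cons, List.countP_map]
      have hc : (List.range u.length).countP
          ((fun j => decide ((x :: t).getD j 0 ≠ (y :: u).getD j 0)) ∘ Nat.succ)
          = (List.range u.length).countP (fun j => decide (t.getD j 0 ≠ u.getD j 0)) := by
        apply List.countP_congr
        intro j _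
        simp only [Function.comp_apply, List.getD_cons_succ]
      rw [hc, ih u hl]
      simp only [List.getD_cons_zero]

lemma pvPermSetSet (S arr : List Int) (cs p2 : Nat) (item : Int)
    (hne : p2 ≠ cs) (hp2 : p2 < arr.length) (hcs : cs < arr.length)
    (hperm : (arr.set cs item).Perm S) :
    (((arr.set p2 item).set cs (arr.getD p2 0)).Perm S) := by
  rw [List.perm_iff_count]
  intro x
  have hgd : (arr.set p2 item).getD cs 0 = arr.getD cs 0 :=
    pvGetD_set_ne arr p2 item cs (fun h => hne h.symm)
  have c1 := pvCountSet arr p2 item hp2 x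
  have c2 := pvCountSet (arr.set p2 item) cs (arr.getD p2 0) (by simpa using hcs) x
  have c3 := pvCountSet arr cs item hcs x
  have hc := hperm.count_eq x
  rw [hgd] at c2
  split_ifs at c1 c2 c3 <;> omega


lemma pvTake_succ_eq (S arr : List Int) (cs : Nat) (hcs : cs < S.length)
    (hlen : arr.length = S.length) (hpre : arr.take cs = S.take cs)
    (hval : arr.getD cs 0 = S.getD cs 0) : arr.take (cs + 1) = S.take (cs + 1) := by
  have hcs' : cs < arr.length := by omega
  rw [List.take_add_one, List.take_add_one, hpre,
    List.getElem?_eq_getElem hcs', List.getElem?_eq_getElem hcs]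
  have : arr[cs] = S[cs] := by
    rw [← List.getD_eq_getElem arr 0 hcs', ← List.getD_eq_getElem S 0 hcs]
    exact hval
  rw [this]


lemma pvCycle_stop (fuel : Nat) (arr : List Int) (cs : Nat) (item : Int) (pos : Nat)
    (writes : Int) (h : pos = cs) : pvCycle fuel arr cs item pos writes = (arr, writes) := by
  rw [pvCycle.eq_def, if_pos h]

lemma pvCycle_step (f : Nat) (arr : List Int) (cs : Nat) (item : Int) (pos : Nat)
    (writes : Int) (h : pos ≠ cs) :
    pvCycle (f + 1) arr cs item pos writes =
      pvCycle f (arr.set (pvSkipEq arr item (pvCsPos arr cs item)) item) cs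
        (arr.getD (pvSkipEq arr item (pvCsPos arr cs item)) 0)
        (pvSkipEq arr item (pvCsPos arr cs item)) (writes + 1) := by
  rw [pvCycle.eq_def, if_neg h]

-- the whole cycle for one cycle_start, entered just after its first write
lemma pvSwapLoop (S : List Int) (hS : S.Pairwise (· ≤ ·)) (cs : Nat) (hcs : cs < S.length) :
    ∀ (W : Nat) (fuel : Nat) (arr : List Int) (item : Int) (writes : Int),
      pvWr S arr ≤ W → pvWr S arr ≤ fuel + 1 →
      arr.length = S.length → arr.take cs = S.take cs →
      (arr.set cs item).Perm S → arr.getD cs 0 ≠ S.getD cs 0 →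
      ∃ arrF,
        pvCycle fuel (arr.set (pvSkipEq arr item (pvCsPos arr cs item)) item) cs
            (arr.getD (pvSkipEq arr item (pvCsPos arr cs item)) 0)
            (pvSkipEq arr item (pvCsPos arr cs item)) (writes + 1) =
          (arrF, writes + ((pvWr S arr - pvWr S arrF : Nat) : Int)) ∧
        arrF.length = S.length ∧ arrF.take (cs + 1) = S.take (cs + 1) ∧ arrF.Perm S ∧
        pvWr S arrF ≤ pvWr S arr := by
  intro W
  induction W with
  | zero =>
    intro fuel arr item writes hW hfuel hlen hpre hperm hwr
    have := pvWr_pos S arr cs hcs hwr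
    omega
  | succ W ih =>
    intro fuel arr item writes hW hfuel hlen hpre hperm hwr
    have hwrpos := pvWr_pos S arr cs hcs hwr
    obtain ⟨hple, hplt, hSv, hav, _⟩ := pvStep S arr cs item hS hlen hcs hpre hperm hwr
    set p2 := pvSkipEq arr item (pvCsPos arr cs item) with hp2def
    clear_value p2
    have hwr' := pvWr_set S arr p2 item hplt hlen hSv hav
    by_cases hp2 : p2 = cs
    · have harr' : arr.set p2 item = arr.set cs item := by rw [hp2]
      refine ⟨arr.set p2 item, ?_, by simp [hlen], ?_, by rw [harr']; exact hperm, by omega⟩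
      · rw [pvCycle_stop _ _ _ _ _ _ hp2]
        have : writes + 1 = writes + ((pvWr S arr - pvWr S (arr.set p2 item) : Nat) : Int) := by
          omega
        rw [← this]
      · rw [harr']
        refine pvTake_succ_eq S (arr.set cs item) cs hcs (by simp [hlen]) ?_ ?_
        · rw [List.take_set_of_le (le_refl cs)]
          exact hpre
        · rw [pvGetD_set_self arr cs item (by omega)]
          rw [← hp2]
          exact hSv.symm
    · have hcslt : cs < p2 := lt_of_le_of_ne hple (fun h => hp2 h.symm)
      have hwrpos2 : 1 ≤ pvWr S (arr.set p2 item) :=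
        pvWr_pos S (arr.set p2 item) cs hcs
          (by rw [pvGetD_set_ne arr p2 item cs (by omega)]; exact hwr)
      obtain ⟨f, rfl⟩ : ∃ f, fuel = f + 1 := ⟨fuel - 1, by omega⟩
      rw [pvCycle_step _ _ _ _ _ _ hp2]
      have hwle : pvWr S (arr.set p2 item) ≤ W := by omega
      have hwf : pvWr S (arr.set p2 item) ≤ f + 1 := by omega
      obtain ⟨arrF, heq, hlenF, htakeF, hpermF, hwrF⟩ :=
        ih f (arr.set p2 item) (arr.getD p2 0) (writes + 1)
          hwle hwf (by simp [hlen])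
          (by rw [List.take_set_of_le (le_of_lt hcslt)]; exact hpre)
          (pvPermSetSet S arr cs p2 item hp2 (by omega) (by omega) hperm)
          (by rw [pvGetD_set_ne arr p2 item cs (by omega)]; exact hwr)
      refine ⟨arrF, ?_, hlenF, htakeF, hpermF, by omega⟩
      rw [heq]
      have : writes + 1 + ((pvWr S (arr.set p2 item) - pvWr S arrF : Nat) : Int) =
          writes + ((pvWr S arr - pvWr S arrF : Nat) : Int) := by omega
      rw [this]


-- the outer loop: after the first k cycle starts, the first k slots are final
lemma pvOuter (array : List Int) :
    ∀ k : Nat, k + 1 ≤ array.length →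
      ∃ arr,
        (PySem.List.pyRange 0 (k : Int) 1).foldl
            (fun st csI =>
              let arr := st.1
              let writes := st.2
              let cs := csI.toNat
              let item := arr.getD cs 0
              let pos := pvCsPos arr cs item
              if pos = cs then (arr, writes)
              else
                let pos2 := pvSkipEq arr item pos
                let item' := arr.getD pos2 0
                pvCycle array.length (arr.set pos2 item) cs item' pos2 (writes + 1))
            (array, 0) =
          (arr, ((pvWr (pvS array) array - pvWr (pvS array) arr : Nat) : Int)) ∧
        arr.length = (pvS array).length ∧ arr.take k = (pvS array).take k ∧
        arr.Perm (pvS array) ∧ pvWr (pvS array) arr ≤ pvWr (pvS array) array := by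
  have hS := PySem.List.sorted_pairwise array (fun x => x)
  have hlenS : (pvS array).length = array.length := PySem.List.length_sorted array _ _
  intro k
  induction k with
  | zero =>
    intro _
    refine ⟨array, ?_, by omega, by simp, (PySem.List.sorted_perm array _ _).symm.symm.symm, le_refl _⟩
    rw [show ((0 : Nat) : Int) = 0 from rfl, PySem.List.pyRange_one_eq_nil (le_refl 0)]
    simp
  | succ k ih =>
    intro h
    obtain ⟨arr, heq, hlen, hpre, hperm, hwr⟩ := ih (by omega)
    have hcs : k < (pvS array).length := by omega
    have hcast : ((k + 1 : Nat) : Int) = (k : Int) + 1 := by push_cast; ring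
    rw [hcast, PySem.List.pyRange_one_succ_right (by omega), List.foldl_append, heq]
    simp only [List.foldl_cons, List.foldl_nil, Int.toNat_natCast]
    have hpermset : (arr.set k (arr.getD k 0)).Perm (pvS array) := by
      rw [pvSet_getD_self arr k (by omega)]
      exact hperm
    by_cases hpos : pvCsPos arr k (arr.getD k 0) = k
    · rw [if_pos hpos]
      have hval : arr.getD k 0 = (pvS array).getD k 0 :=
        ((pvPos_iff (pvS array) arr k (arr.getD k 0) hS hlen hcs hpre hpermset).mp hpos).symm
      exact ⟨arr, rfl, hlen, pvTake_succ_eq (pvS array) arr k hcs hlen hpre hval, hperm, hwr⟩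
    · rw [if_neg hpos]
      have hwrk : arr.getD k 0 ≠ (pvS array).getD k 0 := by
        intro hcon
        exact hpos ((pvPos_iff (pvS array) arr k (arr.getD k 0) hS hlen hcs hpre hpermset).mpr
          hcon.symm)
      obtain ⟨arrF, heqF, hlenF, htakeF, hpermF, hwrF⟩ :=
        pvSwapLoop (pvS array) hS k hcs (pvWr (pvS array) arr) array.length arr (arr.getD k 0)
          ((pvWr (pvS array) array - pvWr (pvS array) arr : Nat) : Int)
          (le_refl _) (by have := pvWr_le (pvS array) arr; omega) hlen hpre hpermset hwrk
      refine ⟨arrF, ?_, hlenF, htakeF, hpermF, by omega⟩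
      rw [heqF]
      have : ((pvWr (pvS array) array - pvWr (pvS array) arr : Nat) : Int) +
          ((pvWr (pvS array) arr - pvWr (pvS array) arrF : Nat) : Int) =
          ((pvWr (pvS array) array - pvWr (pvS array) arrF : Nat) : Int) := by omega
      rw [this]


lemma pvFinalEq (S arr : List Int) (hlen : arr.length = S.length)
    (hpre : arr.take (S.length - 1) = S.take (S.length - 1)) (hperm : arr.Perm S) :
    arr = S := by
  rcases Nat.eq_zero_or_pos S.length with h0 | hpos
  · have hS0 : S = [] := List.length_eq_zero_iff.mp h0
    have hA0 : arr = [] := List.length_eq_zero_iff.mp (by omega)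
    rw [hS0, hA0]
  · have hdA := (List.take_append_drop (S.length - 1) arr).symm
    have hdS := (List.take_append_drop (S.length - 1) S).symm
    have hperm2 : (arr.drop (S.length - 1)).Perm (S.drop (S.length - 1)) := by
      have h2 : ((arr.take (S.length - 1) ++ arr.drop (S.length - 1)).Perm
          (arr.take (S.length - 1) ++ S.drop (S.length - 1))) := by
        rw [List.take_append_drop, hpre, List.take_append_drop]
        exact hperm
      rw [hpre] at h2
      exact (List.perm_append_left_iff _).mp h2
    obtain ⟨a, ha⟩ := List.length_eq_one_iff.mp
      (show (arr.drop (S.length - 1)).length = 1 by simp; omega)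
    obtain ⟨b, hb⟩ := List.length_eq_one_iff.mp
      (show (S.drop (S.length - 1)).length = 1 by simp; omega)
    rw [ha, hb] at hperm2
    have hab : a = b := by
      have := List.perm_singleton.mp hperm2
      simp at this
      exact this
    calc arr = arr.take (S.length - 1) ++ arr.drop (S.length - 1) :=
            (List.take_append_drop _ _).symm
      _ = S.take (S.length - 1) ++ [b] := by rw [hpre, ha, hab]
      _ = S := by rw [← hb, List.take_append_drop]


lemma pvAltEq (array : List Int) :
    cycle_sort_count_writes_alt array = (pvS array, ((pvWr (pvS array) array : Nat) : Int)) := by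
  unfold cycle_sort_count_writes_alt pvS
  dsimp only
  have hfold : ∀ (l : List (Int × Int)) (a : Int),
      l.foldl (fun w p => w + (if p.1 ≠ p.2 then (1 : Int) else 0)) a =
        a + l.countP (fun p => decide (p.1 ≠ p.2)) := by
    intro l
    induction l with
    | nil => simp
    | cons x t ihl =>
      intro a
      rw [List.foldl_cons, List.countP_cons, ihl]
      by_cases hx : x.1 = x.2 <;> simp [hx] <;> omega
  rw [hfold]
  rw [pvZipCount array (PySem.List.sorted array (fun x => x) false)
    (PySem.List.length_sorted array _ _).symm]
  simp [pvS]


lemma pvAEq (array : List Int) :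
    cycle_sort_count_writes array = (pvS array, ((pvWr (pvS array) array : Nat) : Int)) := by
  unfold cycle_sort_count_writes
  dsimp only
  rcases Nat.eq_zero_or_pos array.length with h0 | hpos
  · have hA0 : array = [] := List.length_eq_zero_iff.mp h0
    subst hA0
    simp [pvWr, PySem.List.pyRange_one_eq_nil (show (0:Int) - 1 ≤ 0 by omega)]
    rfl
  · have hcast : ((array.length : Int) - 1) = ((array.length - 1 : Nat) : Int) := by omega
    rw [hcast]
    obtain ⟨arr, heq, hlen, hpre, hperm, hwr⟩ := pvOuter array (array.length - 1) (by omega)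
    have hlenS : (pvS array).length = array.length := PySem.List.length_sorted array _ _
    have harr : arr = pvS array :=
      pvFinalEq (pvS array) arr hlen (by rw [hlenS]; exact hpre) hperm
    rw [heq, harr]
    have : pvWr (pvS array) (pvS array) = 0 := pvWr_self (pvS array)
    rw [this]
    simp


-- ===== VERDICT (by name: the statement is the Claim_ definition above) =====
theorem cycle_sort_count_writes_spec : Claim_equal_cycle_sort_count_writes := by
  intro array _
  unfold Spec_cycle_sort_count_writes
  rw [pvAEq, pvAltEq]
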